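-- pv_equiv track=rewrite | github.com/wakawaka121/Spring---2020 | Short PA 3/dictionary_grid.py | build_rect
-- ===== SOURCE A (Python) =====
-- def add_top_bottom_element(dict_of_elements, width, y):
--     """
--     This function takes 3 paraments to generate the top
--     and bottom of the grid.
--     dict_of_elements: is a dictinary of x,y keys
--     width: is an int value
--     y: is an int value, denotes the y cordinate values
--     of the x,y key.
--     """
--     #when y is 0 build top row
--     if y == 0:
--         for x in range(width):
--             temp_list = []
--             if x == 0:
--                 dict_of_elements[(x,y)] = " "
--             elif x < width-1:
--                 dict_of_elements[(x, y)] = "T"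
--             else:
--                 dict_of_elements[(x,y)] = " "
--     #when y reaches width build bottom
--     else:
--         for x in range(width):
--             temp_list = []
--             if x == 0:
--                 dict_of_elements[(x,y)] = " "
--             elif x < width-1:
--                 dict_of_elements[(x,y)] = "B"
--             else:
--                 dict_of_elements[(x,y)] = " "
--
-- def build_rect(width, height):
--     """
--     This function takes two paraments to generate
--     a grids of specificed height and width
--     width: is an int value
--     height: is an int value
--     dict_of_elements: is returned
--     """
--     assert width >=3 and height >=3
--     dict_of_elements = {}
--     for y in range(height):
--         if y == 0 or y == height -1:
--             add_top_bottom_element(dict_of_elements, width, y)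
--         else:
--             #generates a row, from x,y "coordinates"
--             for x in range(width):
--                 temp_list = []
--                 if x == 0:
--                     dict_of_elements[(x,y)] = "L"
--                 elif x < width -1:
--                     dict_of_elements[(x,y)] = "."
--                 else:
--                     dict_of_elements[(x,y)] = "R"
--     return dict_of_elements
-- ===== SOURCE B (Python) =====
-- def build_rect(width, height):
--     """Region painting: fill everything with '.', then overwrite the top row,
--     bottom row, interior left/right columns, and finally the four corners."""
--     assert width >= 3 and height >= 3
--     d = {}
--     for y in range(height):
--         for x in range(width):
--             d[(x, y)] = "."
--     for x in range(width):
--         d[(x, 0)] = "T"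
--     for x in range(width):
--         d[(x, height - 1)] = "B"
--     for y in range(1, height - 1):
--         d[(0, y)] = "L"
--     for y in range(1, height - 1):
--         d[(width - 1, y)] = "R"
--     d[(0, 0)] = " "
--     d[(width - 1, 0)] = " "
--     d[(0, height - 1)] = " "
--     d[(width - 1, height - 1)] = " "
--     return d
-- ===== Notes on version B (the rewrite author's own statement) =====
-- stated objective: simpler
-- what changed: Replaces A's per-cell branch chains (and its top/bottom helper) by region painting: fill the whole grid with '.', then overwrite the top row, bottom row, interior side columns and finally the four corners in separate whole-region passes.
import Mathlib
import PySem

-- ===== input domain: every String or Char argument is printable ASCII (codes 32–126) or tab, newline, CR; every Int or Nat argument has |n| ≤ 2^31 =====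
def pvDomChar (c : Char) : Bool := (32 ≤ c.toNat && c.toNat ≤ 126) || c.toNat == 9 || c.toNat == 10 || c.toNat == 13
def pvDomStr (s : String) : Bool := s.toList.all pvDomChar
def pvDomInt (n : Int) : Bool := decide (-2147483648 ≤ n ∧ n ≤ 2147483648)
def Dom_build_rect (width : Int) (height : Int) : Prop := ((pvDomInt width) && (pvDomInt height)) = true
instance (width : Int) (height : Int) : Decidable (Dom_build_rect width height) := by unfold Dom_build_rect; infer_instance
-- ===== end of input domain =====

-- B paints regions in whole passes (fill '.', overwrite top/bottom rows, side columns, then corners)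
-- instead of A's per-cell branch chains; objective: simpler, same O(w*h) cost.

-- ===== PORT A =====
def add_top_bottom_element (dict_of_elements : PySem.Dict (Int × Int) String)
    (width : Int) (y : Int) : PySem.Dict (Int × Int) String :=
  if y == 0 then
    (PySem.List.pyRange 0 width 1).foldl (fun d x =>
      if x == 0 then d.insert (x, y) " "
      else if x < width - 1 then d.insert (x, y) "T"
      else d.insert (x, y) " ") dict_of_elements
  else
    (PySem.List.pyRange 0 width 1).foldl (fun d x =>
      if x == 0 then d.insert (x, y) " "
      else if x < width - 1 then d.insert (x, y) "B"
      else d.insert (x, y) " ") dict_of_elements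

def build_rect (width : Int) (height : Int) : List (Int × Int × String) :=
  -- assert width >= 3 and height >= 3  → Pre_build_rect
  let d := (PySem.List.pyRange 0 height 1).foldl (fun d y =>
    if y == 0 || y == height - 1 then add_top_bottom_element d width y
    else (PySem.List.pyRange 0 width 1).foldl (fun d x =>
      if x == 0 then d.insert (x, y) "L"
      else if x < width - 1 then d.insert (x, y) "."
      else d.insert (x, y) "R") d) PySem.Dict.empty
  d.items.map (fun p => (p.1.1, p.1.2, p.2))

-- ===== PORT B =====
def build_rect_alt (width : Int) (height : Int) : List (Int × Int × String) :=
  -- assert width >= 3 and height >= 3  → Pre_build_rect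
  let d0 := (PySem.List.pyRange 0 height 1).foldl (fun d y =>
    (PySem.List.pyRange 0 width 1).foldl (fun d x => d.insert (x, y) ".") d) PySem.Dict.empty
  let d1 := (PySem.List.pyRange 0 width 1).foldl (fun d x => d.insert (x, (0 : Int)) "T") d0
  let d2 := (PySem.List.pyRange 0 width 1).foldl (fun d x => d.insert (x, height - 1) "B") d1
  let d3 := (PySem.List.pyRange 1 (height - 1) 1).foldl (fun d y => d.insert ((0 : Int), y) "L") d2
  let d4 := (PySem.List.pyRange 1 (height - 1) 1).foldl (fun d y => d.insert (width - 1, y) "R") d3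
  let d5 := ((((d4.insert ((0 : Int), (0 : Int)) " ").insert (width - 1, (0 : Int)) " ").insert
      ((0 : Int), height - 1) " ").insert (width - 1, height - 1) " ")
  d5.items.map (fun p => (p.1.1, p.1.2, p.2))

-- ===== PRECONDITION & SPEC =====
-- A's assert raises AssertionError unless width >= 3 and height >= 3.
def Pre_build_rect (width : Int) (height : Int) : Prop := 3 ≤ width ∧ 3 ≤ height
instance (width : Int) (height : Int) : Decidable (Pre_build_rect width height) := by
  unfold Pre_build_rect; infer_instance
def pvWitness_build_rect : Int × Int := (3, 3)

def Spec_build_rect (width : Int) (height : Int) (out : List (Int × Int × String)) : Prop := out = build_rect_alt width height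
instance (width : Int) (height : Int) (out : List (Int × Int × String)) : Decidable (Spec_build_rect width height out) := by unfold Spec_build_rect; infer_instance

-- ===== CLAIM (what is proved, stated in full; the proofs are below) =====
def Claim_equal_build_rect : Prop := ∀ (width : Int) (height : Int), Dom_build_rect width height → Pre_build_rect width height → Spec_build_rect width height (build_rect width height)

-- ===== LEMMAS AND PROOFS =====

-- the row-major list of grid keys, rows 0..m-1
def pvKeys (w : Int) (m : Int) : List (Int × Int) :=
  (PySem.List.pyRange 0 m 1).flatMap (fun y => (PySem.List.pyRange 0 w 1).map (fun x => (x, y)))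

-- the cell value A assigns at (x, y)
def cellA (w h x y : Int) : String :=
  if y == 0 || y == h - 1 then
    (if y == 0 then (if x == 0 then " " else if x < w - 1 then "T" else " ")
     else (if x == 0 then " " else if x < w - 1 then "B" else " "))
  else (if x == 0 then "L" else if x < w - 1 then "." else "R")

lemma mem_pvKeys {w m : Int} {k : Int × Int} :
    k ∈ pvKeys w m ↔ (0 ≤ k.1 ∧ k.1 < w) ∧ (0 ≤ k.2 ∧ k.2 < m) := by
  obtain ⟨x, y⟩ := k
  simp [pvKeys, List.mem_flatMap, PySem.List.mem_pyRange_one]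
  aesop

-- inserting at a present key keeps the map-form, updating one value
lemma insert_mapform {K : List (Int × Int)} {g : Int × Int → String} {k0 : Int × Int}
    (v : String) (hmem : k0 ∈ K) :
    (PySem.Dict.mk (K.map (fun k => (k, g k)))).insert k0 v
      = PySem.Dict.mk (K.map (fun k => (k, if k == k0 then v else g k))) := by
  apply PySem.Dict.ext
  rw [PySem.Dict.items_insert_of_contains]
  · show (K.map (fun k => (k, g k))).map _ = _
    rw [List.map_map]
    apply List.map_congr_left
    intro k _
    by_cases hk : k = k0 <;> simp [hk]
  · rw [PySem.Dict.contains_iff_mem_keys, PySem.Dict.keys_mk, List.map_map]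
    simpa using hmem

-- a whole painting pass over present keys keeps the map-form
lemma pass_mapform (l : List Int) (key : Int → Int × Int) (v : String) :
    ∀ (K : List (Int × Int)) (g : Int × Int → String), (∀ a ∈ l, key a ∈ K) →
    l.foldl (fun d a => d.insert (key a) v) (PySem.Dict.mk (K.map (fun k => (k, g k))))
      = PySem.Dict.mk (K.map (fun k => (k, if l.any (fun a => key a == k) then v else g k))) := by
  induction l with
  | nil => intro K g _; simp
  | cons a l ih =>
    intro K g hmem
    simp only [List.foldl_cons]
    rw [insert_mapform v (hmem a (by simp))]
    rw [ih K _ (fun b hb => hmem b (by simp [hb]))]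
    congr 1
    apply List.map_congr_left
    intro k _
    congr 1
    by_cases h1 : l.any (fun b => key b == k) <;>
      by_cases h2 : k = key a <;>
        simp [h2, BEq.comm]

-- one freshly-keyed row appends its items
lemma row_items (w y : Int) (v : Int → String) (d : PySem.Dict (Int × Int) String)
    (hfresh : ∀ x, d.contains (x, y) = false) :
    ((PySem.List.pyRange 0 w 1).foldl (fun d x => d.insert (x, y) (v x)) d).items
      = d.items ++ (PySem.List.pyRange 0 w 1).map (fun x => ((x, y), v x)) := by
  exact PySem.Dict.items_foldl_insert_fresh _ (fun x => (x, y)) v d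
    (fun a _ => hfresh a)
    ((PySem.List.nodup_pyRange_one 0 w).map (fun a b h => by simpa using congrArg Prod.fst h))

-- the generic row-major fill: nested loops inserting vf x y build the map-form dict
lemma grid_items (w : Int) (vf : Int → Int → String) : ∀ (m : Nat),
    ((PySem.List.pyRange 0 (m : Int) 1).foldl (fun d y =>
        (PySem.List.pyRange 0 w 1).foldl (fun d x => d.insert (x, y) (vf x y)) d)
      PySem.Dict.empty)
      = PySem.Dict.mk ((pvKeys w m).map (fun k => (k, vf k.1 k.2))) := by
  intro m
  induction m with
  | zero =>
    apply PySem.Dict.ext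
    simp [pvKeys, PySem.List.pyRange_one_eq_nil, PySem.Dict.empty]
  | succ n ih =>
    have hcast : ((n : Int) + 1) = ((n + 1 : Nat) : Int) := by push_cast; ring
    rw [← hcast, PySem.List.pyRange_one_succ_right (by positivity), List.foldl_append]
    rw [ih]
    simp only [List.foldl_cons, List.foldl_nil]
    have hfresh : ∀ x : Int,
        (PySem.Dict.mk ((pvKeys w n).map (fun k => (k, vf k.1 k.2)))).contains (x, (n : Int))
          = false := by
      intro x
      rw [← Bool.not_eq_true, PySem.Dict.contains_iff_mem_keys, PySem.Dict.keys_mk, List.map_map]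
      intro hcon
      have : (x, (n : Int)) ∈ pvKeys w n := by simpa using hcon
      have := mem_pvKeys.mp this
      omega
    apply PySem.Dict.ext
    rw [row_items _ _ _ _ hfresh]
    have hsplit : pvKeys w ((n + 1 : Nat) : Int)
        = pvKeys w n ++ (PySem.List.pyRange 0 w 1).map (fun x => (x, (n : Int))) := by
      unfold pvKeys
      rw [← hcast, PySem.List.pyRange_one_succ_right (by positivity), List.flatMap_append]
      simp
    show _ ++ _ = List.map _ (pvKeys w ((n + 1 : Nat) : Int))
    rw [hsplit, List.map_append, List.map_map]
    rfl

-- A's loop body is a row fill with value cellA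
lemma stepA_eq (w h : Int) (y : Int) (d : PySem.Dict (Int × Int) String) :
    (if y == 0 || y == h - 1 then add_top_bottom_element d w y
     else (PySem.List.pyRange 0 w 1).foldl (fun d x =>
       if x == 0 then d.insert (x, y) "L"
       else if x < w - 1 then d.insert (x, y) "."
       else d.insert (x, y) "R") d)
    = (PySem.List.pyRange 0 w 1).foldl (fun d x => d.insert (x, y) (cellA w h x y)) d := by
  unfold add_top_bottom_element cellA
  by_cases h0 : y == 0 <;> by_cases h1 : y == h - 1 <;>
    simp only [h0, h1, Bool.or_true, Bool.or_false, if_true, Bool.or_self] <;>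
    · apply PySem.List.foldl_congr_mem
      intro d x _
      by_cases hx0 : x == 0 <;> by_cases hxw : x < w - 1 <;> simp [hx0, hxw]

-- A builds the map-form dict with value cellA
lemma build_rect_dict (w h : Int) (hh : 0 ≤ h) :
    ((PySem.List.pyRange 0 h 1).foldl (fun d y =>
      if y == 0 || y == h - 1 then add_top_bottom_element d w y
      else (PySem.List.pyRange 0 w 1).foldl (fun d x =>
        if x == 0 then d.insert (x, y) "L"
        else if x < w - 1 then d.insert (x, y) "."
        else d.insert (x, y) "R") d) PySem.Dict.empty)
    = PySem.Dict.mk ((pvKeys w h).map (fun k => (k, cellA w h k.1 k.2))) := by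
  have hfold : ∀ d : PySem.Dict (Int × Int) String,
      (PySem.List.pyRange 0 h 1).foldl (fun d y =>
        if y == 0 || y == h - 1 then add_top_bottom_element d w y
        else (PySem.List.pyRange 0 w 1).foldl (fun d x =>
          if x == 0 then d.insert (x, y) "L"
          else if x < w - 1 then d.insert (x, y) "."
          else d.insert (x, y) "R") d) d
      = (PySem.List.pyRange 0 h 1).foldl (fun d y =>
          (PySem.List.pyRange 0 w 1).foldl (fun d x => d.insert (x, y) (cellA w h x y)) d) d := by
    intro d
    apply PySem.List.foldl_congr_mem
    intro d y _
    exact stepA_eq w h y d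
  rw [hfold]
  have := grid_items w (fun x y => cellA w h x y) h.toNat
  rwa [Int.toNat_of_nonneg hh] at this

-- B's final per-cell value, as produced by the painting passes
def cellB (w h : Int) (k : Int × Int) : String :=
  if k == (w - 1, h - 1) then " "
  else if k == ((0 : Int), h - 1) then " "
  else if k == (w - 1, (0 : Int)) then " "
  else if k == ((0 : Int), (0 : Int)) then " "
  else if (PySem.List.pyRange 1 (h - 1) 1).any (fun a => (w - 1, a) == k) then "R"
  else if (PySem.List.pyRange 1 (h - 1) 1).any (fun a => ((0 : Int), a) == k) then "L"
  else if (PySem.List.pyRange 0 w 1).any (fun a => (a, h - 1) == k) then "B"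
  else if (PySem.List.pyRange 0 w 1).any (fun a => (a, (0 : Int)) == k) then "T"
  else "."

lemma build_rect_alt_eq (w h : Int) (hw : 3 ≤ w) (hh : 3 ≤ h) :
    build_rect_alt w h
      = ((pvKeys w h).map (fun k => (k, cellB w h k))).map (fun p => (p.1.1, p.1.2, p.2)) := by
  have hd0 : (PySem.List.pyRange 0 h 1).foldl (fun d y =>
      (PySem.List.pyRange 0 w 1).foldl (fun d x => d.insert (x, y) ".") d) PySem.Dict.empty
      = PySem.Dict.mk ((pvKeys w h).map (fun k => (k, "."))) := by
    have := grid_items w (fun _ _ => ".") h.toNat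
    rwa [Int.toNat_of_nonneg (by omega)] at this
  unfold build_rect_alt
  dsimp only
  rw [hd0]
  rw [pass_mapform _ _ _ _ _ (fun a ha => by
    rw [PySem.List.mem_pyRange_one] at ha; exact mem_pvKeys.mpr (by constructor <;> omega))]
  rw [pass_mapform _ _ _ _ _ (fun a ha => by
    rw [PySem.List.mem_pyRange_one] at ha; exact mem_pvKeys.mpr (by constructor <;> omega))]
  rw [pass_mapform _ _ _ _ _ (fun a ha => by
    rw [PySem.List.mem_pyRange_one] at ha; exact mem_pvKeys.mpr (by constructor <;> omega))]
  rw [pass_mapform _ _ _ _ _ (fun a ha => by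
    rw [PySem.List.mem_pyRange_one] at ha; exact mem_pvKeys.mpr (by constructor <;> omega))]
  rw [insert_mapform _ (mem_pvKeys.mpr (by constructor <;> constructor <;> omega))]
  rw [insert_mapform _ (mem_pvKeys.mpr (by constructor <;> constructor <;> omega))]
  rw [insert_mapform _ (mem_pvKeys.mpr (by constructor <;> constructor <;> omega))]
  rw [insert_mapform _ (mem_pvKeys.mpr (by constructor <;> constructor <;> omega))]
  rfl

-- the two per-cell values agree on the grid
set_option maxHeartbeats 2000000 in
lemma cell_eq (w h x y : Int) (hw : 3 ≤ w) (hh : 3 ≤ h)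
    (hx : 0 ≤ x ∧ x < w) (hy : 0 ≤ y ∧ y < h) :
    cellA w h x y = cellB w h (x, y) := by
  have hT : ((PySem.List.pyRange 0 w 1).any (fun a => (a, (0 : Int)) == (x, y)) = true)
      ↔ y = 0 := by
    simp only [List.any_eq_true, PySem.List.mem_pyRange_one, beq_iff_eq, Prod.mk.injEq]
    constructor
    · rintro ⟨t, ht, h1, h2⟩; omega
    · intro h; exact ⟨x, ⟨hx.1, hx.2⟩, rfl, h.symm⟩
  have hB : ((PySem.List.pyRange 0 w 1).any (fun a => (a, h - 1) == (x, y)) = true)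
      ↔ y = h - 1 := by
    simp only [List.any_eq_true, PySem.List.mem_pyRange_one, beq_iff_eq, Prod.mk.injEq]
    constructor
    · rintro ⟨t, ht, h1, h2⟩; omega
    · intro h; exact ⟨x, ⟨hx.1, hx.2⟩, rfl, h.symm⟩
  have hL : ((PySem.List.pyRange 1 (h - 1) 1).any (fun a => ((0 : Int), a) == (x, y)) = true)
      ↔ x = 0 ∧ 1 ≤ y ∧ y < h - 1 := by
    simp only [List.any_eq_true, PySem.List.mem_pyRange_one, beq_iff_eq, Prod.mk.injEq]
    constructor
    · rintro ⟨t, ht, h1, h2⟩; omega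
    · rintro ⟨h1, h2, h3⟩; exact ⟨y, ⟨h2, h3⟩, h1.symm, rfl⟩
  have hR : ((PySem.List.pyRange 1 (h - 1) 1).any (fun a => (w - 1, a) == (x, y)) = true)
      ↔ x = w - 1 ∧ 1 ≤ y ∧ y < h - 1 := by
    simp only [List.any_eq_true, PySem.List.mem_pyRange_one, beq_iff_eq, Prod.mk.injEq]
    constructor
    · rintro ⟨t, ht, h1, h2⟩; omega
    · rintro ⟨h1, h2, h3⟩; exact ⟨y, ⟨h2, h3⟩, h1.symm, rfl⟩
  unfold cellA cellB
  simp only [hT, hB, hL, hR, Bool.or_eq_true, beq_iff_eq, Prod.mk.injEq]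
  split_ifs <;> first | rfl | (exfalso; omega)

lemma build_rect_eq (w h : Int) (hh : 3 ≤ h) :
    build_rect w h
      = ((pvKeys w h).map (fun k => (k, cellA w h k.1 k.2))).map (fun p => (p.1.1, p.1.2, p.2)) := by
  unfold build_rect
  dsimp only
  rw [build_rect_dict w h (by omega)]

-- ===== VERDICT (by name: the statement is the Claim_ definition above) =====
theorem build_rect_spec : Claim_equal_build_rect := by
  intro w h _ hpre
  obtain ⟨hw, hh⟩ := hpre
  show build_rect w h = build_rect_alt w h
  rw [build_rect_eq w h hh, build_rect_alt_eq w h hw hh]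
  rw [List.map_map, List.map_map]
  apply List.map_congr_left
  intro k hk
  obtain ⟨hx, hy⟩ := mem_pvKeys.mp hk
  simp [cell_eq w h k.1 k.2 hw hh hx hy]
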